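-- pv_equiv track=rewrite | github.com/kapilspawar/ctf-2022 | vigenere-cipher.py | generate_key
-- ===== SOURCE A (Python) =====
-- def generate_key(string, keyword):
--     keyword = list(keyword)
--     if len(string) == len(keyword):
--         return keyword
--     else:
--         for i in range(len(string) - len(keyword)):
--             keyword.append(keyword[i % len(keyword)])
--     return "".join(keyword)
-- ===== SOURCE B (Python) =====
-- def generate_key(string, keyword):
--     # Key shorter than the string: repeat whole keyword blocks and add a prefix
--     # for the remainder instead of appending one character per loop iteration.
--     if len(string) < len(keyword):
--         # keyword already covers the string; return it whole (as A does)
--         return keyword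
--     q, r = divmod(len(string), len(keyword))
--     return keyword * q + keyword[:r]
-- ===== Notes on version B (the rewrite author's own statement) =====
-- stated objective: simpler
-- what changed: Replaces A's character-by-character append loop (indexing the growing list with i % len) by a closed-form block construction: divmod gives the number of whole keyword repetitions and the remainder prefix.
-- outside the precondition, e.g. on generate_key('ab', 'cd'): A returns ['c', 'd'], B returns 'cd'
import Mathlib
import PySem

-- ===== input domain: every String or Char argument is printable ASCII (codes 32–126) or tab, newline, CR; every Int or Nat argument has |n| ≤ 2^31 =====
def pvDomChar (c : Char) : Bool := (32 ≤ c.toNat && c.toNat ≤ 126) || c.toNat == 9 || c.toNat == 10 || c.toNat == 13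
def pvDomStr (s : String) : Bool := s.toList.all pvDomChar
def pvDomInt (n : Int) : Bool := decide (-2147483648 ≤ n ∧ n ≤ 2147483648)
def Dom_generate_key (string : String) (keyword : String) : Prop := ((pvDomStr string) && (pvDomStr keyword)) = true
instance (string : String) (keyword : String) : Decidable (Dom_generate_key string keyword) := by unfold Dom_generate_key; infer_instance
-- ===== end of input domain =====

-- B replaces A's per-character append loop by divmod block repetition (objective: simpler).

-- ===== PORT A =====
-- Literal port of A: copy the keyword to a char list, then append
-- keyword[i % len(keyword)] (len of the GROWING list) for each i in
-- range(len(string) - len(keyword)).  On the equal-length branch Python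
-- returns the char LIST (not a str) and with an empty keyword the indexing
-- raises ZeroDivisionError; both cases are outside Pre_generate_key below
-- (here the list is rendered as a String / getD falls back to ' ').
def generate_key (string : String) (keyword : String) : String :=
  let kw := keyword.toList
  if string.toList.length = kw.length then
    String.ofList kw
  else
    String.ofList ((List.range (string.toList.length - kw.length)).foldl
      (fun acc i => acc ++ [acc.getD (i % acc.length) ' ']) kw)

-- ===== PORT B =====
-- Literal port of Source B: guard for a short string, else q,r = divmod and
-- whole-keyword blocks plus a remainder prefix (str * q → replicate/flatten,
-- keyword[:r] → take; all lengths are nonnegative so Nat div/mod = Python divmod).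
def generate_key_alt (string : String) (keyword : String) : String :=
  let s := string.toList
  let kw := keyword.toList
  if s.length < kw.length then keyword
  else
    let q := s.length / kw.length
    let r := s.length % kw.length
    String.ofList ((List.replicate q kw).flatten ++ kw.take r)

-- ===== PRECONDITION & SPEC =====
-- Pre_ excludes (a) equal-length pairs, where A returns a list of characters
-- instead of a str (not a value of the declared return type), and (b) an empty
-- keyword with a longer string, where A raises ZeroDivisionError.
def Pre_generate_key (string : String) (keyword : String) : Prop :=
  string.toList.length ≠ keyword.toList.length ∧ keyword.toList ≠ []
instance (string : String) (keyword : String) : Decidable (Pre_generate_key string keyword) := by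
  unfold Pre_generate_key; infer_instance

def pvWitness_generate_key : String × String := ("abc", "ab")

def Spec_generate_key (string : String) (keyword : String) (out : String) : Prop := out = generate_key_alt string keyword
instance (string : String) (keyword : String) (out : String) : Decidable (Spec_generate_key string keyword out) := by unfold Spec_generate_key; infer_instance

-- ===== CLAIM (what is proved, stated in full; the proofs are below) =====
def Claim_equal_generate_key : Prop := ∀ (string : String) (keyword : String), Dom_generate_key string keyword → Pre_generate_key string keyword → Spec_generate_key string keyword (generate_key string keyword)

-- ===== LEMMAS AND PROOFS =====

-- the canonical cyclic extension: position j holds kw[j % k]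
def pvCyc (kw : List Char) (n : Nat) : List Char :=
  (List.range n).map (fun j => kw.getD (j % kw.length) ' ')

lemma pvCyc_self (kw : List Char) (h : kw ≠ []) : pvCyc kw kw.length = kw := by
  apply List.ext_getElem
  · simp [pvCyc]
  · intro j h1 h2
    simp [pvCyc, Nat.mod_eq_of_lt h2, List.getD, List.getElem?_eq_getElem h2]

-- A's loop, run n steps, produces the cyclic extension of length k + n.
lemma pvLoop_eq (kw : List Char) (h : kw ≠ []) (n : Nat) :
    (List.range n).foldl (fun acc i => acc ++ [acc.getD (i % acc.length) ' ']) kw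
      = pvCyc kw (kw.length + n) := by
  induction n with
  | zero => simpa using (pvCyc_self kw h).symm
  | succ n ih =>
    have hk : 0 < kw.length := List.length_pos_iff.mpr h
    rw [List.range_succ, List.foldl_append, ih]
    have hlen : (pvCyc kw (kw.length + n)).length = kw.length + n := by
      simp [pvCyc]
    have hmod : n % (pvCyc kw (kw.length + n)).length = n := by
      rw [hlen]; exact Nat.mod_eq_of_lt (by omega)
    have hget : (pvCyc kw (kw.length + n)).getD n ' ' = kw.getD (n % kw.length) ' ' := by
      have hn : n < kw.length + n := by omega
      simp [pvCyc, List.getD, List.getElem?_eq_getElem, hn, List.getElem?_map, hn]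
    have : pvCyc kw (kw.length + (n + 1))
        = pvCyc kw (kw.length + n) ++ [kw.getD (n % kw.length) ' '] := by
      show (List.range (kw.length + n + 1)).map _ = _
      rw [List.range_succ, List.map_append]
      simp [pvCyc, Nat.add_mod_left]
    simp only [List.foldl_cons, List.foldl_nil, hmod, hget, this]

-- B's block construction also produces the cyclic extension.
lemma pvBlocks_eq (kw : List Char) (h : kw ≠ []) (q r : Nat) (hr : r < kw.length) :
    (List.replicate q kw).flatten ++ kw.take r = pvCyc kw (kw.length * q + r) := by
  induction q with
  | zero =>
    simp only [List.replicate, List.flatten_nil, List.nil_append, Nat.mul_zero, Nat.zero_add]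
    apply List.ext_getElem
    · simp [pvCyc]; omega
    · intro j h1 h2
      have hj : j < r := by simp at h1; omega
      have hjk : j < kw.length := by omega
      simp [pvCyc, Nat.mod_eq_of_lt hjk, List.getD, List.getElem?_eq_getElem hjk]
  | succ q ih =>
    have : kw.length * (q + 1) + r = kw.length + (kw.length * q + r) := by ring
    rw [this]
    have hshift : pvCyc kw (kw.length + (kw.length * q + r))
        = kw ++ pvCyc kw (kw.length * q + r) := by
      show (List.range (kw.length + (kw.length * q + r))).map _ = _
      rw [List.range_add, List.map_append, List.map_map]
      congr 1
      · exact pvCyc_self kw h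
      · apply List.map_congr_left
        intro j _
        simp [Nat.add_mod_left]
    rw [hshift, ← ih]
    simp [List.replicate_succ, List.flatten_cons, List.append_assoc]

-- ===== VERDICT (by name: the statement is the Claim_ definition above) =====
theorem generate_key_spec : Claim_equal_generate_key := by
  intro string keyword _ hpre
  obtain ⟨hne, hkw⟩ := hpre
  unfold Spec_generate_key generate_key generate_key_alt
  simp only []
  set s := string.toList with hs
  set kw := keyword.toList with hk
  have hk0 : 0 < kw.length := List.length_pos_iff.mpr hkw
  by_cases hlt : s.length < kw.length
  · -- short string: A's range is empty, B returns the keyword whole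
    have hsub : s.length - kw.length = 0 := by omega
    rw [if_neg hne, if_pos hlt, hsub]
    simp [List.range_zero, hk, String.ofList_toList]
  · -- long string: both sides equal the cyclic extension of length s.length
    have hgt : kw.length < s.length := by omega
    rw [if_neg hne, if_neg hlt]
    have hA := pvLoop_eq kw hkw (s.length - kw.length)
    have hB := pvBlocks_eq kw hkw (s.length / kw.length) (s.length % kw.length)
      (Nat.mod_lt _ hk0)
    have h1 : kw.length + (s.length - kw.length) = s.length := by omega
    have h2 : kw.length * (s.length / kw.length) + s.length % kw.length = s.length :=
      Nat.div_add_mod _ _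
    rw [hA, h1, hB, h2]
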